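-- pv_equiv track=rewrite | github.com/qsdrqs/dotfiles | tools/split_plugins.py | advance_past_trailing_whitespace
-- ===== SOURCE A (Python) =====
-- def advance_past_trailing_whitespace(source: str, pos: int) -> int:
--     length = len(source)
--     idx = pos
--     while idx < length and source[idx] in " \t":
--         idx += 1
--     if idx < length and source[idx] == ",":
--         idx += 1
--         while idx < length and source[idx] in " \t":
--             idx += 1
--     if idx < length and source[idx] == "\n":
--         idx += 1
--     return idx
-- ===== SOURCE B (Python) =====
-- def advance_past_trailing_whitespace(source: str, pos: int) -> int:
--     rest = source[pos:]
--     tail = rest.lstrip(" \t")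
--     if tail.startswith(","):
--         tail = tail[1:].lstrip(" \t")
--     idx = pos + (len(rest) - len(tail))
--     if tail.startswith("\n"):
--         idx += 1
--     return idx
-- ===== Notes on version B (the rewrite author's own statement) =====
-- stated objective: idiomatic
-- what changed: Replaced A's three explicit character-by-character index loops with slice/lstrip/startswith string operations: B takes source[pos:], strips leading spaces/tabs, optionally consumes a comma plus more spaces/tabs, and recovers the index from the lengths.
-- outside the precondition, e.g. on advance_past_trailing_whitespace('  ', -1): A returns 2, B returns 0; on advance_past_trailing_whitespace('ab', -5): A raises IndexError, B returns -5
import Mathlib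
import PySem

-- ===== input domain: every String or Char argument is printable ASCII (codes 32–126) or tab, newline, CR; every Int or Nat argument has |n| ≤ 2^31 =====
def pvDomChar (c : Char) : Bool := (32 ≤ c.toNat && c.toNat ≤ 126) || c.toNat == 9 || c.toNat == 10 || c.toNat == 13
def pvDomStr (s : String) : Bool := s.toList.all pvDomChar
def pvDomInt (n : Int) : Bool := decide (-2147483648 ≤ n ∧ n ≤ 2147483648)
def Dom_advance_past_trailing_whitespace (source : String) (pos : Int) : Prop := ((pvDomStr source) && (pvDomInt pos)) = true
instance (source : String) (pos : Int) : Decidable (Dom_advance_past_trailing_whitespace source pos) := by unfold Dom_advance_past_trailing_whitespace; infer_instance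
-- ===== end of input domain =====

-- B replaces A's three explicit index-scanning loops by slice/lstrip/startswith string
-- operations (objective: idiomatic/simpler); equivalence is proved for 0 ≤ pos.

-- ===== PORT A =====
def pvSpTab (c : Char) : Bool := c == ' ' || c == '\t'

-- the two identical 'while idx < length and source[idx] in " \t": idx += 1' loops of A
def pvSkipA (source : String) (length idx : Int) : Int :=
  if h : idx < length then
    match PySem.Str.pyGet? source idx with
    | some c => if pvSpTab c then pvSkipA source length (idx + 1) else idx
    | none => idx   -- Python raises IndexError here (only reachable for idx < -len, outside Pre_)
  else idx
termination_by (length - idx).toNat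
decreasing_by omega

def advance_past_trailing_whitespace (source : String) (pos : Int) : Int :=
  let length := PySem.Str.len source
  let idx := pvSkipA source length pos
  let idx := if idx < length ∧ PySem.Str.pyGet? source idx = some ',' then
               pvSkipA source length (idx + 1)
             else idx
  if idx < length ∧ PySem.Str.pyGet? source idx = some '\n' then idx + 1 else idx

-- ===== PORT B =====
-- s.lstrip(" \t") is ported as List.dropWhile pvSpTab on the code points (exact for these two chars)
def advance_past_trailing_whitespace_alt (source : String) (pos : Int) : Int :=
  let rest := PySem.List.slice source.toList (some pos) none
  let tail := rest.dropWhile pvSpTab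
  let tail := if PySem.Chars.startswith tail [','] then
                (PySem.List.slice tail (some 1) none).dropWhile pvSpTab
              else tail
  let idx := pos + ((rest.length : Int) - (tail.length : Int))
  if PySem.Chars.startswith tail ['\n'] then idx + 1 else idx

-- ===== PRECONDITION & SPEC =====
-- Pre_ excludes negative pos: for pos < -len(source) A raises IndexError, and for
-- -len(source) ≤ pos < 0 A's value is an artefact of Python's negative-index wraparound,
-- which B's slice-based scan has no reason to reproduce.
def Pre_advance_past_trailing_whitespace (source : String) (pos : Int) : Prop := 0 ≤ pos
instance (source : String) (pos : Int) : Decidable (Pre_advance_past_trailing_whitespace source pos) := by unfold Pre_advance_past_trailing_whitespace; infer_instance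
def pvWitness_advance_past_trailing_whitespace : String × Int := ("x ,\tz", 1)
def Spec_advance_past_trailing_whitespace (source : String) (pos : Int) (out : Int) : Prop := out = advance_past_trailing_whitespace_alt source pos
instance (source : String) (pos : Int) (out : Int) : Decidable (Spec_advance_past_trailing_whitespace source pos out) := by unfold Spec_advance_past_trailing_whitespace; infer_instance

-- ===== CLAIM (what is proved, stated in full; the proofs are below) =====
def Claim_equal_advance_past_trailing_whitespace : Prop := ∀ (source : String) (pos : Int), Dom_advance_past_trailing_whitespace source pos → Pre_advance_past_trailing_whitespace source pos → Spec_advance_past_trailing_whitespace source pos (advance_past_trailing_whitespace source pos)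

-- ===== LEMMAS AND PROOFS =====
theorem pv_dropWhile_eq_drop (p : Char → Bool) (l : List Char) :
    l.dropWhile p = l.drop (l.takeWhile p).length := by
  induction l with
  | nil => rfl
  | cons x xs ih =>
      by_cases h : p x <;> simp [List.dropWhile, List.takeWhile, h, ih]

theorem pv_skip_spec (s : String) : ∀ (d k : Nat), s.toList.length - k ≤ d →
    pvSkipA s (PySem.Str.len s) (k : Int) =
      (k : Int) + (((s.toList.drop k).takeWhile pvSpTab).length : Int) := by
  intro d
  induction d with
  | zero =>
      intro k hk
      have hlen : s.toList.length ≤ k := by omega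
      have hlt : ¬ ((k : Int) < PySem.Str.len s) := by
        rw [PySem.Str.len_eq]; exact_mod_cast not_lt.mpr hlen
      rw [pvSkipA]
      simp [List.drop_eq_nil_of_le hlen]
      intro hks
      exfalso
      have hs : s.toList.length = s.length := by simp
      omega
  | succ d ih =>
      intro k hk
      rw [pvSkipA]
      by_cases hlt : (k : Int) < PySem.Str.len s
      · have hkn : k < s.toList.length := by
          rw [PySem.Str.len_eq] at hlt; exact_mod_cast hlt
        have hget : PySem.Str.pyGet? s (k : Int) = some (s.toList[k]) := by
          rw [PySem.Str.pyGet?_natCast]; simp [hkn]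
        have hdrop : s.toList.drop k = s.toList[k] :: s.toList.drop (k + 1) :=
          (List.drop_eq_getElem_cons hkn)
        by_cases hc : pvSpTab (s.toList[k])
        · have hih := ih (k + 1) (by omega)
          simp only [dif_pos hlt, hget, if_pos hc]
          push_cast at hih ⊢
          rw [hih, hdrop]
          simp [List.takeWhile, hc]
          omega
        · simp only [dif_pos hlt, hget, if_neg hc]
          rw [hdrop]
          simp [List.takeWhile, hc]
      · have hlen : s.toList.length ≤ k := by
          rw [PySem.Str.len_eq] at hlt
          exact_mod_cast not_lt.mp hlt
        simp [List.drop_eq_nil_of_le hlen]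
        intro hks
        exfalso
        have hs : s.toList.length = s.length := by simp
        omega

theorem pv_startswith_single (l : List Char) (m : Nat) (c : Char) :
    PySem.Chars.startswith (l.drop m) [c] = true ↔ l[m]? = some c := by
  rw [PySem.Chars.startswith_iff, ← List.head?_drop]
  cases h : l.drop m with
  | nil => simp
  | cons x xs => simp [List.cons_prefix_cons, eq_comm]

theorem pv_lt_of_getElem? {l : List Char} {m : Nat} {c : Char} (h : l[m]? = some c) :
    m < l.length := by
  rcases List.getElem?_eq_some_iff.mp h with ⟨hm, _⟩
  exact hm

theorem pv_dropWhile_drop (p : Char → Bool) (l : List Char) (j : Nat) :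
    (l.drop j).dropWhile p = l.drop (j + ((l.drop j).takeWhile p).length) := by
  rw [pv_dropWhile_eq_drop, List.drop_drop]

theorem pv_takeWhile_le (p : Char → Bool) (l : List Char) :
    (l.takeWhile p).length ≤ l.length := by
  induction l with
  | nil => simp
  | cons x xs ih => by_cases h : p x <;> simp [List.takeWhile, h] <;> omega

theorem pv_main (s : String) (k : Nat) :
    advance_past_trailing_whitespace s (k : Int) = advance_past_trailing_whitespace_alt s (k : Int) := by
  have hsl : s.toList.length = s.length := by simp
  set l := s.toList with hl
  set n := l.length with hn
  set t1 := ((l.drop k).takeWhile pvSpTab).length with ht1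
  set m1 := k + t1 with hm1
  have hskip1 : pvSkipA s (PySem.Str.len s) (k : Int) = (m1 : Int) := by
    rw [pv_skip_spec s n k (Nat.sub_le _ _)]; push_cast [hm1]; ring
  have htail1 : (l.drop k).dropWhile pvSpTab = l.drop m1 := pv_dropWhile_drop pvSpTab l k
  have hlen1 : t1 ≤ n - k := by
    calc t1 ≤ (l.drop k).length := pv_takeWhile_le _ _
    _ = n - k := by rw [List.length_drop]
  have ht1z : n ≤ k → t1 = 0 := by
    intro h
    rw [ht1, List.drop_eq_nil_of_le h]
    rfl
  have hm1n : m1 ≤ n ∨ (n ≤ k ∧ m1 = k) := by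
    by_cases h : k ≤ n
    · left; omega
    · right; constructor
      · omega
      · have := ht1z (by omega); omega
  have hlenS : PySem.Str.len s = (n : Int) := by rw [PySem.Str.len_eq, hn, hl]
  -- unfold both ports
  rw [advance_past_trailing_whitespace, advance_past_trailing_whitespace_alt]
  rw [hlenS] at hskip1
  simp only [hskip1, hlenS, PySem.Str.pyGet?_natCast, ← hl,
    PySem.List.slice_from_natCast, PySem.List.slice_from_one, List.tail_drop, ← hn, htail1]
  by_cases hc : l[m1]? = some ','
  · -- comma branch taken on both sides
    have hm1lt : m1 < n := pv_lt_of_getElem? hc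
    have hA : ((m1 : Int) < (n : Int) ∧ l[m1]? = some ',') := ⟨by exact_mod_cast hm1lt, hc⟩
    have hB : PySem.Chars.startswith (l.drop m1) [','] = true :=
      (pv_startswith_single l m1 ',').mpr hc
    set t2 := ((l.drop (m1 + 1)).takeWhile pvSpTab).length with ht2
    set m2 := m1 + 1 + t2 with hm2
    have hskip2 : pvSkipA s ((n : Nat) : Int) ((m1 : Int) + 1) = (m2 : Int) := by
      have hsp := pv_skip_spec s n (m1 + 1) (Nat.sub_le _ _)
      rw [hlenS] at hsp
      push_cast at hsp ⊢
      rw [hsp, hm2, ← ht2]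
      push_cast; ring
    have htail2 : (l.drop (m1 + 1)).dropWhile pvSpTab = l.drop m2 := by
      rw [pv_dropWhile_drop, ← ht2, hm2]
    have hlen2 : t2 ≤ n - (m1 + 1) := by
      calc t2 ≤ (l.drop (m1 + 1)).length := pv_takeWhile_le _ _
      _ = n - (m1 + 1) := by rw [List.length_drop]
    simp only [if_pos hA, if_pos hB, hskip2, htail2,
      List.length_drop, ← hn, PySem.Str.pyGet?_natCast, ← hl]
    have hidx : (k : Int) + (((n - k : Nat) : Int) - ((n - m2 : Nat) : Int)) = (m2 : Int) := by
      omega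
    rw [hidx]
    by_cases hnl : l[m2]? = some '\n'
    · have : ((m2 : Int) < (n : Int) ∧ l[m2]? = some '\n') :=
        ⟨by exact_mod_cast pv_lt_of_getElem? hnl, hnl⟩
      rw [if_pos this, if_pos ((pv_startswith_single l m2 '\n').mpr hnl)]
    · have hA2 : ¬ ((m2 : Int) < (n : Int) ∧ l[m2]? = some '\n') := fun h => hnl h.2
      have hB2 : ¬ PySem.Chars.startswith (l.drop m2) ['\n'] = true := fun h =>
        hnl ((pv_startswith_single l m2 '\n').mp h)
      rw [if_neg hA2, if_neg hB2]
  · -- no comma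
    have hA : ¬ ((m1 : Int) < (n : Int) ∧ l[m1]? = some ',') := fun h => hc h.2
    have hB : ¬ PySem.Chars.startswith (l.drop m1) [','] = true := fun h =>
      hc ((pv_startswith_single l m1 ',').mp h)
    simp only [if_neg hA, if_neg hB, List.length_drop, ← hn,
      PySem.Str.pyGet?_natCast, ← hl]
    have hidx : (k : Int) + (((n - k : Nat) : Int) - ((n - m1 : Nat) : Int)) = (m1 : Int) := by
      omega
    rw [hidx]
    by_cases hnl : l[m1]? = some '\n'
    · have : ((m1 : Int) < (n : Int) ∧ l[m1]? = some '\n') :=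
        ⟨by exact_mod_cast pv_lt_of_getElem? hnl, hnl⟩
      rw [if_pos this, if_pos ((pv_startswith_single l m1 '\n').mpr hnl)]
    · have hA2 : ¬ ((m1 : Int) < (n : Int) ∧ l[m1]? = some '\n') := fun h => hnl h.2
      have hB2 : ¬ PySem.Chars.startswith (l.drop m1) ['\n'] = true := fun h =>
        hnl ((pv_startswith_single l m1 '\n').mp h)
      rw [if_neg hA2, if_neg hB2]

-- ===== VERDICT (by name: the statement is the Claim_ definition above) =====
theorem advance_past_trailing_whitespace_spec : Claim_equal_advance_past_trailing_whitespace := by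
  intro source pos _ hpre
  unfold Spec_advance_past_trailing_whitespace
  have hk : pos = ((pos.toNat : Nat) : Int) := (Int.toNat_of_nonneg hpre).symm
  rw [hk]
  exact pv_main source pos.toNat
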